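-- pv_equiv track=rewrite | github.com/ksh960910/Algorithm | Programmers_level1/음양 더하기.py | solution
-- ===== SOURCE A (Python) =====
-- def solution(absolutes, signs):
--     answer = 0
--     for tup in zip(absolutes, signs):
--         tup = list(tup)
--         if tup[1] == False:
--             tup[0]*=-1
--         answer+=tup[0]
--     return answer
-- ===== SOURCE B (Python) =====
-- def solution(absolutes, signs):
--     total = sum(a for a, _ in zip(absolutes, signs))
--     neg = sum(a for a, s in zip(absolutes, signs) if s == False)
--     return total - 2 * neg
-- ===== Notes on version B (the rewrite author's own statement) =====
-- stated objective: alternative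
-- what changed: Replaces the single conditional-negating accumulation loop by two plain summations over zip (total and the False-signed subtotal) combined arithmetically as total - 2*subtotal.
import Mathlib
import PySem

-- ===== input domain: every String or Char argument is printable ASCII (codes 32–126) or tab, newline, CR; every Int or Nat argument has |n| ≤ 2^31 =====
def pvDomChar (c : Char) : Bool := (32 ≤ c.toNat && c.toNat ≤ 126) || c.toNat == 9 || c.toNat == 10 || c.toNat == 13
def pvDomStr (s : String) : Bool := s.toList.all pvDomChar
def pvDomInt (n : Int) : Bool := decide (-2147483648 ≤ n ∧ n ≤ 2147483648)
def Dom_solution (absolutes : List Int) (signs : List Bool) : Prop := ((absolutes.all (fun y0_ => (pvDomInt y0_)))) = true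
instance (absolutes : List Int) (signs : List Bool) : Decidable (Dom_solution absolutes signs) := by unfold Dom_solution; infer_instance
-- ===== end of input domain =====

-- B replaces A's conditional-negating accumulation loop by two plain sums over zip combined as total - 2*subtotal (alternative decomposition, same cost).


-- ===== PORT A =====
-- literal port of A: one loop over zip, negating the element when the sign equals False, accumulating into answer
def solution (absolutes : List Int) (signs : List Bool) : Int :=
  (absolutes.zip signs).foldl
    (fun answer tup =>
      answer + (if tup.2 = false then tup.1 * (-1) else tup.1)) 0

-- ===== PORT B =====
-- port of B: total of all paired absolute values, subtotal of those paired with a False sign, result total - 2*subtotal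
def solution_alt (absolutes : List Int) (signs : List Bool) : Int :=
  let total := ((absolutes.zip signs).map (fun tup => tup.1)).sum
  let neg := (((absolutes.zip signs).filter (fun tup => tup.2 = false)).map (fun tup => tup.1)).sum
  total - 2 * neg

-- ===== PRECONDITION & SPEC =====
def Spec_solution (absolutes : List Int) (signs : List Bool) (out : Int) : Prop := out = solution_alt absolutes signs
instance (absolutes : List Int) (signs : List Bool) (out : Int) : Decidable (Spec_solution absolutes signs out) := by unfold Spec_solution; infer_instance

-- ===== CLAIM (what is proved, stated in full; the proofs are below) =====
def Claim_equal_solution : Prop := ∀ (absolutes : List Int) (signs : List Bool), Dom_solution absolutes signs → Spec_solution absolutes signs (solution absolutes signs)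

-- ===== LEMMAS AND PROOFS =====
theorem solution_fold_eq (l : List (Int × Bool)) (acc : Int) :
    l.foldl (fun answer tup => answer + (if tup.2 = false then tup.1 * (-1) else tup.1)) acc
      = acc + (l.map (fun tup => tup.1)).sum
          - 2 * ((l.filter (fun tup => tup.2 = false)).map (fun tup => tup.1)).sum := by
  induction l generalizing acc with
  | nil => simp
  | cons h t ih =>
    simp only [List.foldl_cons]
    rw [ih]
    rcases h with ⟨a, s⟩
    cases s <;> simp [List.filter_cons] <;> ring

-- ===== VERDICT (by name: the statement is the Claim_ definition above) =====
theorem solution_spec : Claim_equal_solution := by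
  intro absolutes signs _
  unfold Spec_solution solution solution_alt
  rw [solution_fold_eq]
  ring
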